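-- pv_equiv track=rewrite | github.com/akshithgara/2048-AI-BFTS | grid.py | move_is_possible
-- ===== SOURCE A (Python) =====
-- def transpose(field):
--     return [list(row) for row in zip(*field)]
--
-- def invert(field):
--     return [row[::-1] for row in field]
--
-- def move_is_possible(direction, field1):
--     def row_is_left_movable(row):
--         def change(i):  # true if there'll be change in i-th tile
--             if row[i] == 0 and row[i + 1] != 0:  # Move
--                 return True
--             if row[i] != 0 and row[i + 1] == row[i]:  # Merge
--                 return True
--             return False
--
--         return any(change(i) for i in range(len(row) - 1))
--
--     # //direction   0: up, 1: right, 2: down, 3: left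
--     check = {}
--     check['Left'] = lambda field: \
--         any(row_is_left_movable(row) for row in field)
--
--     check['Right'] = lambda field: \
--         check['Left'](invert(field))
--
--     check['Up'] = lambda field: \
--         check['Left'](transpose(field))
--
--     check['Down'] = lambda field: \
--         check['Right'](transpose(field))
--
--     if direction in check:
--         # //direction   0: up, 1: right, 2: down, 3: left
--         return check[direction](field1)
--     else:
--         return False
-- ===== SOURCE B (Python) =====
-- def move_is_possible(direction, field1):
--     # Direct scan over adjacent cell pairs in the original grid; no transpose/invert copies.
--     def movable(a, b):  # a then b in scan direction: empty-then-tile moves, equal tiles merge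
--         return (a == 0 and b != 0) or (a != 0 and b == a)
--
--     if direction == 'Left':
--         return any(movable(r[i], r[i + 1]) for r in field1 for i in range(len(r) - 1))
--     if direction == 'Right':
--         return any(movable(r[i + 1], r[i]) for r in field1 for i in range(len(r) - 1))
--     if direction in ('Up', 'Down'):
--         w = min((len(r) for r in field1), default=0)
--         for i in range(len(field1) - 1):
--             for c in range(w):
--                 a, b = field1[i][c], field1[i + 1][c]
--                 if movable(a, b) if direction == 'Up' else movable(b, a):
--                     return True
--         return False
--     return False
-- ===== Notes on version B (the rewrite author's own statement) =====
-- stated objective: simpler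
-- what changed: Replaces the dict-of-lambdas with transpose/invert grid copies by a direct scan of adjacent cell pairs in the original grid, with the pair orientation chosen per direction.
import Mathlib
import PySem

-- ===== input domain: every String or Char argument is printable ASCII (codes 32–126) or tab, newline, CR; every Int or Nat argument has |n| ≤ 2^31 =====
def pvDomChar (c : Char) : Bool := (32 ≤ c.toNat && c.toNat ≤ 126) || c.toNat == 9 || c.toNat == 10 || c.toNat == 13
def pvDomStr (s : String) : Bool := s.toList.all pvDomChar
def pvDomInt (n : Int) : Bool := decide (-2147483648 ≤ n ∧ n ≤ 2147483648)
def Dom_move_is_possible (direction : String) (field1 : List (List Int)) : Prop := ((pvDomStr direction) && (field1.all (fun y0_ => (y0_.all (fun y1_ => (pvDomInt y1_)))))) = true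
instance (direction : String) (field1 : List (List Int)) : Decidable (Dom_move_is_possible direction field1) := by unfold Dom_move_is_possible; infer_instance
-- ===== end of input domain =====

-- B drops the transpose/invert copies and the dict of lambdas and scans adjacent
-- cell pairs of the original grid directly; return value only, no side effects.

-- ===== PORT A =====
-- zip(*field): columns truncated to the shortest row (zip() on an empty field gives []).
-- All indices used are in range, so getD with default 0/[] is exact Python indexing.
def transposeA (f : List (List Int)) : List (List Int) :=
  (List.range (((f.map List.length).min?).getD 0)).map (fun c => f.map (fun row => row.getD c 0))

-- row[::-1] on every row
def invertA (f : List (List Int)) : List (List Int) := f.map List.reverse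

-- inner 'change(i)': the same if-chain as the Python
def changeA (row : List Int) (i : Nat) : Bool :=
  if row.getD i 0 == 0 && row.getD (i + 1) 0 != 0 then true
  else if row.getD i 0 != 0 && row.getD (i + 1) 0 == row.getD i 0 then true
  else false

def rowIsLeftMovableA (row : List Int) : Bool :=
  (List.range (row.length - 1)).any (fun i => changeA row i)

def checkLeftA (f : List (List Int)) : Bool := f.any rowIsLeftMovableA
def checkRightA (f : List (List Int)) : Bool := checkLeftA (invertA f)
def checkUpA (f : List (List Int)) : Bool := checkLeftA (transposeA f)
def checkDownA (f : List (List Int)) : Bool := checkRightA (transposeA f)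

-- 'direction in check' over the four inserted keys, else False
def move_is_possible (direction : String) (field1 : List (List Int)) : Bool :=
  if direction == "Left" then checkLeftA field1
  else if direction == "Right" then checkRightA field1
  else if direction == "Up" then checkUpA field1
  else if direction == "Down" then checkDownA field1
  else false

-- ===== PORT B =====
def movableB (a b : Int) : Bool := (a == 0 && b != 0) || (a != 0 && b == a)

def move_is_possible_alt (direction : String) (field1 : List (List Int)) : Bool :=
  if direction == "Left" then
    field1.any (fun r => (List.range (r.length - 1)).any
      (fun i => movableB (r.getD i 0) (r.getD (i + 1) 0)))
  else if direction == "Right" then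
    field1.any (fun r => (List.range (r.length - 1)).any
      (fun i => movableB (r.getD (i + 1) 0) (r.getD i 0)))
  else if direction == "Up" || direction == "Down" then
    -- w = min(len(r) for r in field1, default=0); a, b the vertically adjacent cells
    (List.range (field1.length - 1)).any (fun i =>
      (List.range (((field1.map List.length).min?).getD 0)).any (fun c =>
        if direction == "Up" then
          movableB ((field1.getD i []).getD c 0) ((field1.getD (i + 1) []).getD c 0)
        else
          movableB ((field1.getD (i + 1) []).getD c 0) ((field1.getD i []).getD c 0)))
  else false

-- ===== PRECONDITION & SPEC =====
def Spec_move_is_possible (direction : String) (field1 : List (List Int)) (out : Bool) : Prop :=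
  out = move_is_possible_alt direction field1
instance (direction : String) (field1 : List (List Int)) (out : Bool) :
    Decidable (Spec_move_is_possible direction field1 out) := by
  unfold Spec_move_is_possible; infer_instance

-- ===== CLAIM (what is proved, stated in full; the proofs are below) =====
def Claim_equal_move_is_possible : Prop :=
  ∀ (direction : String) (field1 : List (List Int)),
    Dom_move_is_possible direction field1 →
      Spec_move_is_possible direction field1 (move_is_possible direction field1)

-- ===== LEMMAS AND PROOFS =====
theorem any_congr' {α : Type} (l : List α) (p q : α → Bool) (h : ∀ a ∈ l, p a = q a) :
    l.any p = l.any q := by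
  induction l with
  | nil => rfl
  | cons x xs ih =>
    simp only [List.any_cons, h x (by simp), ih (fun a ha => h a (by simp [ha]))]

theorem change_eq_movable (row : List Int) (i : Nat) :
    changeA row i = movableB (row.getD i 0) (row.getD (i + 1) 0) := by
  simp only [changeA, movableB]
  split_ifs with h1 h2 <;> simp_all

theorem any_range_congr (n : Nat) (p q : Nat → Bool) (h : ∀ i, i < n → p i = q i) :
    (List.range n).any p = (List.range n).any q :=
  any_congr' _ _ _ (fun i hi => h i (List.mem_range.mp hi))

theorem any_range_swap (n m : Nat) (q : Nat → Nat → Bool) :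
    ((List.range n).any fun a => (List.range m).any fun b => q a b)
      = ((List.range m).any fun b => (List.range n).any fun a => q a b) := by
  rw [Bool.eq_iff_iff]
  simp only [List.any_eq_true, List.mem_range]
  tauto

theorem getD_reverse (r : List Int) (i : Nat) (h : i < r.length) :
    r.reverse.getD i 0 = r.getD (r.length - 1 - i) 0 := by
  rw [List.getD_eq_getElem _ _ (by simpa using h),
      List.getD_eq_getElem _ _ (by omega), List.getElem_reverse]

-- left-movability of a reversed row = the swapped-pair scan of the row
theorem rev_scan (r : List Int) (p : Int → Int → Bool) :
    ((List.range (r.reverse.length - 1)).any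
        (fun i => p (r.reverse.getD i 0) (r.reverse.getD (i + 1) 0)))
      = ((List.range (r.length - 1)).any
        (fun i => p (r.getD (i + 1) 0) (r.getD i 0))) := by
  rw [List.length_reverse, Bool.eq_iff_iff]
  simp only [List.any_eq_true, List.mem_range]
  constructor
  · rintro ⟨i, hi, hp⟩
    refine ⟨r.length - 2 - i, by omega, ?_⟩
    rw [getD_reverse r i (by omega), getD_reverse r (i + 1) (by omega)] at hp
    have e1 : r.length - 1 - i = r.length - 2 - i + 1 := by omega
    have e2 : r.length - 1 - (i + 1) = r.length - 2 - i := by omega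
    rw [e1, e2] at hp; exact hp
  · rintro ⟨j, hj, hp⟩
    refine ⟨r.length - 2 - j, by omega, ?_⟩
    rw [getD_reverse r _ (by omega), getD_reverse r _ (by omega)]
    have e1 : r.length - 1 - (r.length - 2 - j) = j + 1 := by omega
    have e2 : r.length - 1 - (r.length - 2 - j + 1) = j := by omega
    rw [e1, e2]; exact hp

theorem rowLeft_eq (r : List Int) :
    rowIsLeftMovableA r
      = (List.range (r.length - 1)).any
          (fun i => movableB (r.getD i 0) (r.getD (i + 1) 0)) := by
  unfold rowIsLeftMovableA
  exact any_range_congr _ _ _ (fun i _ => change_eq_movable r i)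

theorem rowLeft_reverse_eq (r : List Int) :
    rowIsLeftMovableA r.reverse
      = (List.range (r.length - 1)).any
          (fun i => movableB (r.getD (i + 1) 0) (r.getD i 0)) := by
  rw [rowLeft_eq, rev_scan]

theorem col_getD (f : List (List Int)) (c r : Nat) (hr : r < f.length) :
    (f.map (fun row => row.getD c 0)).getD r 0 = (f.getD r []).getD c 0 := by
  rw [List.getD_eq_getElem _ _ (by simpa using hr),
      List.getD_eq_getElem _ _ hr, List.getElem_map]

theorem checkUp_eq (f : List (List Int)) :
    checkUpA f
      = (List.range (f.length - 1)).any (fun i =>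
          (List.range (((f.map List.length).min?).getD 0)).any (fun c =>
            movableB ((f.getD i []).getD c 0) ((f.getD (i + 1) []).getD c 0))) := by
  unfold checkUpA checkLeftA transposeA
  rw [List.any_map]
  refine Eq.trans (any_range_congr _ _
    (fun c => (List.range (f.length - 1)).any (fun j =>
      movableB ((f.getD j []).getD c 0) ((f.getD (j + 1) []).getD c 0)))
    (fun c hc => ?_)) (any_range_swap _ _ _)
  show rowIsLeftMovableA (f.map fun row => row.getD c 0) = _
  rw [rowLeft_eq]
  have hlen : (f.map fun row => row.getD c 0).length = f.length := by simp
  rw [hlen]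
  refine any_range_congr _ _ _ (fun j hj => ?_)
  rw [col_getD f c j (by omega), col_getD f c (j + 1) (by omega)]

theorem checkDown_eq (f : List (List Int)) :
    checkDownA f
      = (List.range (f.length - 1)).any (fun i =>
          (List.range (((f.map List.length).min?).getD 0)).any (fun c =>
            movableB ((f.getD (i + 1) []).getD c 0) ((f.getD i []).getD c 0))) := by
  unfold checkDownA checkRightA checkLeftA invertA transposeA
  rw [List.any_map, List.any_map]
  refine Eq.trans (any_range_congr _ _
    (fun c => (List.range (f.length - 1)).any (fun j =>
      movableB ((f.getD (j + 1) []).getD c 0) ((f.getD j []).getD c 0)))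
    (fun c hc => ?_)) (any_range_swap _ _ _)
  show rowIsLeftMovableA (f.map fun row => row.getD c 0).reverse = _
  rw [rowLeft_reverse_eq]
  have hlen : (f.map fun row => row.getD c 0).length = f.length := by simp
  rw [hlen]
  refine any_range_congr _ _ _ (fun j hj => ?_)
  rw [col_getD f c j (by omega), col_getD f c (j + 1) (by omega)]

-- ===== VERDICT =====
theorem move_is_possible_spec : Claim_equal_move_is_possible := by
  intro direction field1 _
  unfold Spec_move_is_possible
  by_cases hL : direction = "Left"
  · subst hL
    show checkLeftA field1 = field1.any _
    exact any_congr' _ _ _ (fun r _ => rowLeft_eq r)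
  by_cases hR : direction = "Right"
  · subst hR
    show checkRightA field1 = field1.any _
    unfold checkRightA checkLeftA invertA
    rw [List.any_map]
    exact any_congr' _ _ _ (fun r _ => rowLeft_reverse_eq r)
  by_cases hU : direction = "Up"
  · subst hU
    show checkUpA field1 = (List.range _).any _
    exact checkUp_eq field1
  by_cases hD : direction = "Down"
  · subst hD
    show checkDownA field1 = (List.range _).any _
    exact checkDown_eq field1
  · unfold move_is_possible move_is_possible_alt
    simp only [show (direction == "Left") = false by simp [hL],
      show (direction == "Right") = false by simp [hR],
      show (direction == "Up") = false by simp [hU],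
      show (direction == "Down") = false by simp [hD]]
    simp
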